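-- pv_equiv track=rewrite | github.com/Gubeommo/Programmers | Level2/오픈채팅방/Py_Solution.py | solution
-- ===== SOURCE A (Python) =====
-- def solution(record):
--     answer = []
--     user={}
--     count=[]
--     e=0
--     l=0
--
--     for i in range(len(record)):
--         cmd = record[i].split()
--         if cmd[0] == 'Enter':
--             user[cmd[1]] = cmd[2]
--             count.append(cmd[0])
--             count.append(cmd[1])
--         elif cmd[0] == 'Leave':
--             count.append(cmd[0])
--             count.append(cmd[1])
--         elif cmd[0] == 'Change':
--             user[cmd[1]] = cmd[2]
--     for j in count:
--         if e == 1: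
--             answer.append("{}님이 들어왔습니다.".format(user[j]))
--             e -=1
--         elif l == 1:
--             answer.append("{}님이 나갔습니다.".format(user[j]))
--             l -=1
--         if j == 'Enter':
--             e +=1
--         elif j == 'Leave':
--             l +=1
--     return answer
-- ===== SOURCE B (Python) =====
-- def solution(record):
--     # Pass 1: only the final nickname of each id matters, so build it alone.
--     user = {}
--     for line in record:
--         cmd = line.split()
--         if cmd[0] in ('Enter', 'Change'):
--             user[cmd[1]] = cmd[2]
--     # Pass 2: re-read the log and emit a message per Enter/Leave line directly.
--     answer = []
--     for line in record:
--         cmd = line.split()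
--         if cmd[0] == 'Enter':
--             answer.append("{}님이 들어왔습니다.".format(user[cmd[1]]))
--         elif cmd[0] == 'Leave':
--             answer.append("{}님이 나갔습니다.".format(user[cmd[1]]))
--     return answer
-- ===== Notes on version B (the rewrite author's own statement) =====
-- stated objective: simpler
-- what changed: B drops A's event log entirely: instead of recording a flattened command/id list and replaying it through an e/l counter state machine, B builds only the final name dict in one pass over record and then re-reads record, formatting a message per Enter/Leave line directly.
-- outside the precondition, e.g. on solution(['Enter Enter a', 'Leave Enter']): A raises KeyError, B returns ['a님이 들어왔습니다.', 'a님이 나갔습니다.']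
import Mathlib
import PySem

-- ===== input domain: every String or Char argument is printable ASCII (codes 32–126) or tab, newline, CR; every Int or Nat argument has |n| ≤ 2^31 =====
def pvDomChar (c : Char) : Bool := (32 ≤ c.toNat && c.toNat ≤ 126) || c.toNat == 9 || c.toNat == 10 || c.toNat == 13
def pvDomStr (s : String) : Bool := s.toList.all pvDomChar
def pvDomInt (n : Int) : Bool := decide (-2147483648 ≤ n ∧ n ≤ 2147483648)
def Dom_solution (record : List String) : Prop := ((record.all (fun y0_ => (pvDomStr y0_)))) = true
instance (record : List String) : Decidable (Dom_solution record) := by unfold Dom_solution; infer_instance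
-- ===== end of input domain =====

-- B drops A's event log and e/l counter state machine: it builds only the final name dict in one
-- pass and then re-reads record, emitting one message per Enter/Leave line directly (simpler).

-- ===== PORT A =====
-- first loop of A: build the name dict and the flattened count list
def stepA (s : PySem.Dict String String × List String) (line : String) :
    PySem.Dict String String × List String :=
  let cmd := PySem.Str.split₀ line
  let c0 := cmd.getD 0 ""
  if c0 = "Enter" then (s.1.insert (cmd.getD 1 "") (cmd.getD 2 ""), s.2 ++ [c0, cmd.getD 1 ""])
  else if c0 = "Leave" then (s.1, s.2 ++ [c0, cmd.getD 1 ""])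
  else if c0 = "Change" then (s.1.insert (cmd.getD 1 "") (cmd.getD 2 ""), s.2)
  else s

-- second loop of A over the flattened list, state (answer, e, l)
def loopA (user : PySem.Dict String String) (s : List String × Int × Int) (j : String) :
    List String × Int × Int :=
  let t :=
    if s.2.1 = 1 then (s.1 ++ [user.getD j "" ++ "님이 들어왔습니다."], s.2.1 - 1, s.2.2)
    else if s.2.2 = 1 then (s.1 ++ [user.getD j "" ++ "님이 나갔습니다."], s.2.1, s.2.2 - 1)
    else s
  if j = "Enter" then (t.1, t.2.1 + 1, t.2.2)
  else if j = "Leave" then (t.1, t.2.1, t.2.2 + 1)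
  else t

def solution (record : List String) : List String :=
  let r := record.foldl stepA (PySem.Dict.empty, [])
  (r.2.foldl (loopA r.1) ([], 0, 0)).1

-- ===== PORT B =====
-- B's first pass: only the final nickname of each id
def buildB (d : PySem.Dict String String) (line : String) : PySem.Dict String String :=
  let cmd := PySem.Str.split₀ line
  if cmd.getD 0 "" = "Enter" ∨ cmd.getD 0 "" = "Change" then
    d.insert (cmd.getD 1 "") (cmd.getD 2 "")
  else d

-- B's per-line message (none for Change / other lines)
def msgB (user : PySem.Dict String String) (line : String) : Option String :=
  let cmd := PySem.Str.split₀ line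
  if cmd.getD 0 "" = "Enter" then some (user.getD (cmd.getD 1 "") "" ++ "님이 들어왔습니다.")
  else if cmd.getD 0 "" = "Leave" then some (user.getD (cmd.getD 1 "") "" ++ "님이 나갔습니다.")
  else none

def solution_alt (record : List String) : List String :=
  let user := record.foldl buildB PySem.Dict.empty
  record.foldl (fun acc line =>
    match msgB user line with
    | some m => acc ++ [m]
    | none => acc) []

-- ===== PRECONDITION & SPEC =====
-- lineOK: the line has enough tokens for the indexing A performs (else Python IndexError), and on
-- Enter/Leave lines the user-id token is not itself the word 'Enter' or 'Leave'.
def lineOK (line : String) : Bool :=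
  let t := PySem.Str.split₀ line
  !t.isEmpty &&
  (!(t.getD 0 "" == "Enter" || t.getD 0 "" == "Change") || decide (3 ≤ t.length)) &&
  (!(t.getD 0 "" == "Leave") || decide (2 ≤ t.length)) &&
  (!(t.getD 0 "" == "Enter" || t.getD 0 "" == "Leave") ||
    (!(t.getD 1 "" == "Enter") && !(t.getD 1 "" == "Leave")))

-- named record i: some Enter/Change line assigns a name to id i (else A's user[id] raises KeyError)
def named (record : List String) (i : String) : Bool :=
  record.any (fun l =>
    ((PySem.Str.split₀ l).getD 0 "" == "Enter" || (PySem.Str.split₀ l).getD 0 "" == "Change") &&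
    (PySem.Str.split₀ l).getD 1 "" == i)

-- Pre_ excludes inputs on which A raises (a whitespace-only line or too few tokens: IndexError; a
-- Leave id never assigned a name: KeyError in A and B alike), and records where an Enter/Leave
-- line's user-id token is itself 'Enter' or 'Leave', on which A's flattened command/id list
-- conflates the id with a command and raises KeyError or emits extra messages.
def Pre_solution (record : List String) : Prop :=
  (record.all (fun l =>
    lineOK l &&
    (!((PySem.Str.split₀ l).getD 0 "" == "Leave") ||
      named record ((PySem.Str.split₀ l).getD 1 "")))) = true

instance (record : List String) : Decidable (Pre_solution record) := by
  unfold Pre_solution; infer_instance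

def pvWitness_solution : List String :=
  ["Enter uid1234 Muzi", "Enter uid4567 Prodo", "Leave uid1234", "Change uid4567 Ryan", "Enter uid1234 Prodo"]

def Spec_solution (record : List String) (out : List String) : Prop := out = solution_alt record
instance (record : List String) (out : List String) : Decidable (Spec_solution record out) := by
  unfold Spec_solution; infer_instance

-- ===== CLAIM (what is proved, stated in full; the proofs are below) =====
def Claim_equal_solution : Prop :=
  ∀ (record : List String), Dom_solution record → Pre_solution record →
    Spec_solution record (solution record)

-- ===== LEMMAS AND PROOFS =====

-- the (action, id) event a line contributes to A's flattened count list, if any (proof-only)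
def evOf (line : String) : Option (String × String) :=
  let cmd := PySem.Str.split₀ line
  if cmd.getD 0 "" = "Enter" then some ("Enter", cmd.getD 1 "")
  else if cmd.getD 0 "" = "Leave" then some ("Leave", cmd.getD 1 "")
  else none

-- a well-formed event: action is the literal it was built with, id is not a command word
def goodEv (p : String × String) : Prop :=
  (p.1 = "Enter" ∨ p.1 = "Leave") ∧ p.2 ≠ "Enter" ∧ p.2 ≠ "Leave"

def flat2 (ev : List (String × String)) : List String := ev.flatMap (fun p => [p.1, p.2])

theorem flat2_append (ev ev' : List (String × String)) :
    flat2 (ev ++ ev') = flat2 ev ++ flat2 ev' := by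
  simp [flat2]

theorem good_evOf (l : String) (h : lineOK l = true) :
    ∀ p, evOf l = some p → goodEv p := by
  intro p hp
  by_cases h0 : (PySem.Str.split₀ l)[0]?.getD "" = "Enter"
  · simp [evOf, List.getD, h0] at hp
    simp [lineOK, List.getD, h0] at h
    subst hp
    exact ⟨Or.inl rfl, by tauto, by tauto⟩
  · by_cases h1 : (PySem.Str.split₀ l)[0]?.getD "" = "Leave"
    · simp [evOf, List.getD, h0, h1] at hp
      simp [lineOK, List.getD, h0, h1] at h
      subst hp
      exact ⟨Or.inr rfl, by tauto, by tauto⟩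
    · simp [evOf, List.getD, h0, h1] at hp

-- A's first pass computes B's dict and (flattened) exactly the events evOf collects
theorem fold_rel (record : List String) (d : PySem.Dict String String)
    (ev : List (String × String)) :
    record.foldl stepA (d, flat2 ev) =
      (record.foldl buildB d, flat2 (ev ++ record.filterMap evOf)) := by
  induction record generalizing d ev with
  | nil => simp
  | cons line rest ih =>
    simp only [List.foldl_cons, List.filterMap_cons]
    by_cases h0 : (PySem.Str.split₀ line)[0]?.getD "" = "Enter"
    · have hA : stepA (d, flat2 ev) line =
          (buildB d line, flat2 (ev ++ [("Enter", (PySem.Str.split₀ line)[1]?.getD "")])) := by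
        simp [stepA, buildB, List.getD, h0, flat2_append, flat2]
      rw [hA, ih]
      simp [evOf, List.getD, h0, flat2_append]
    · by_cases h1 : (PySem.Str.split₀ line)[0]?.getD "" = "Leave"
      · have hA : stepA (d, flat2 ev) line =
            (buildB d line, flat2 (ev ++ [("Leave", (PySem.Str.split₀ line)[1]?.getD "")])) := by
          simp [stepA, buildB, List.getD, h0, h1, flat2_append, flat2]
        rw [hA, ih]
        simp [evOf, List.getD, h0, h1, flat2_append]
      · by_cases h2 : (PySem.Str.split₀ line)[0]?.getD "" = "Change"
        · have hA : stepA (d, flat2 ev) line = (buildB d line, flat2 ev) := by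
            simp [stepA, buildB, List.getD, h0, h1, h2]
          rw [hA, ih]
          simp [evOf, List.getD, h0, h1]
        · have hA : stepA (d, flat2 ev) line = (buildB d line, flat2 ev) := by
            simp [stepA, buildB, List.getD, h0, h1, h2]
          rw [hA, ih]
          simp [evOf, List.getD, h0, h1]

-- how B's emit acts on one event
def emitEv (user : PySem.Dict String String) (p : String × String) : String :=
  if p.1 = "Enter" then user.getD p.2 "" ++ "님이 들어왔습니다."
  else user.getD p.2 "" ++ "님이 나갔습니다."

-- A's state machine over the flattened good events emits exactly one message per event
theorem loop_flat (user : PySem.Dict String String) (ev : List (String × String))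
    (hev : ∀ p ∈ ev, goodEv p) (ans : List String) :
    (flat2 ev).foldl (loopA user) (ans, 0, 0) = (ans ++ ev.map (emitEv user), 0, 0) := by
  induction ev generalizing ans with
  | nil => simp [flat2]
  | cons p rest ih =>
    obtain ⟨hact, hi1, hi2⟩ := hev p (by simp)
    have hrest : ∀ q ∈ rest, goodEv q := fun q hq => hev q (by simp [hq])
    have hflat : flat2 (p :: rest) = p.1 :: p.2 :: flat2 rest := by simp [flat2]
    rw [hflat]
    simp only [List.foldl_cons]
    rcases hact with ha | ha
    · have s1 : loopA user (ans, 0, 0) p.1 = (ans, 1, 0) := by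
        simp [loopA, ha]
      have s2 : loopA user (ans, 1, 0) p.2 =
          (ans ++ [user.getD p.2 "" ++ "님이 들어왔습니다."], 0, 0) := by
        simp [loopA, hi1, hi2]
      rw [s1, s2, ih hrest]
      simp [emitEv, ha]
    · have hne : p.1 ≠ "Enter" := by rw [ha]; decide
      have s1 : loopA user (ans, 0, 0) p.1 = (ans, 0, 1) := by
        simp [loopA, ha, hne]
      have s2 : loopA user (ans, 0, 1) p.2 =
          (ans ++ [user.getD p.2 "" ++ "님이 나갔습니다."], 0, 0) := by
        simp [loopA, hi1, hi2]
      rw [s1, s2, ih hrest]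
      simp [emitEv, hne]

-- B's append loop is a filterMap
theorem foldl_msg (user : PySem.Dict String String) (l : List String) (acc : List String) :
    l.foldl (fun acc line =>
      match msgB user line with
      | some m => acc ++ [m]
      | none => acc) acc = acc ++ l.filterMap (msgB user) := by
  induction l generalizing acc with
  | nil => simp
  | cons line rest ih =>
    simp only [List.foldl_cons, List.filterMap_cons]
    cases h : msgB user line <;> simp [h, ih]

-- per line, emitting B's message equals emitting the event's message
theorem msg_ev (user : PySem.Dict String String) (line : String) :
    msgB user line = (evOf line).map (emitEv user) := by
  by_cases h0 : (PySem.Str.split₀ line)[0]?.getD "" = "Enter"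
  · simp [msgB, evOf, emitEv, List.getD, h0]
  · by_cases h1 : (PySem.Str.split₀ line)[0]?.getD "" = "Leave"
    · simp [msgB, evOf, emitEv, List.getD, h0, h1]
    · simp [msgB, evOf, List.getD, h0, h1]

-- ===== VERDICT (by name: the statement is the Claim_ definition above) =====
theorem solution_spec : Claim_equal_solution := by
  intro record _ hpre
  have hall : ∀ l ∈ record, lineOK l = true := by
    intro l hl
    have h := (List.all_eq_true.1 hpre) l hl
    simp only [Bool.and_eq_true] at h
    exact h.1
  have hgood : ∀ p ∈ record.filterMap evOf, goodEv p := by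
    intro p hp
    obtain ⟨l, hl, he⟩ := List.mem_filterMap.1 hp
    exact good_evOf l (hall l hl) p he
  have hfold := fold_rel record PySem.Dict.empty []
  simp only [List.nil_append] at hfold
  show solution record = solution_alt record
  rw [show solution record =
        ((record.foldl stepA (PySem.Dict.empty, ([] : List String))).2.foldl
          (loopA (record.foldl stepA (PySem.Dict.empty, [])).1) ([], 0, 0)).1 from rfl]
  rw [show (PySem.Dict.empty, ([] : List String)) =
        ((PySem.Dict.empty : PySem.Dict String String), flat2 []) from rfl, hfold]
  rw [loop_flat _ _ hgood []]
  show (record.filterMap evOf).map (emitEv (record.foldl buildB PySem.Dict.empty)) =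
    solution_alt record
  rw [show solution_alt record =
        record.foldl (fun acc line =>
          match msgB (record.foldl buildB PySem.Dict.empty) line with
          | some m => acc ++ [m]
          | none => acc) [] from rfl,
      foldl_msg]
  simp [msg_ev, List.map_filterMap]
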